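-- pv_equiv track=rewrite | github.com/kr4g/Klotho | klotho/chronos/rhythm_pairs/rp.py | _calculate_measures
-- ===== SOURCE A (Python) =====
-- from typing import Tuple
--
-- def _calculate_measures(sequence: Tuple[int, ...], mm_deltas: Tuple[int, ...]) -> Tuple[Tuple[int, Tuple[int, ...]], ...]:
--     partitions = []
--     current_partition = []
--     mm_index = 0
--     current_sum = 0
--
--     for value in sequence:
--         current_partition.append(value)
--         current_sum += value
--
--         if current_sum == mm_deltas[mm_index]:
--             partitions.append((mm_deltas[mm_index], tuple(current_partition)))
--             current_partition = []
--             current_sum = 0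
--             mm_index = (mm_index + 1) % len(mm_deltas)  # Cycle through mm_deltas
--
--     return tuple(partitions)
-- ===== SOURCE B (Python) =====
-- from typing import Tuple
--
-- def _calculate_measures(sequence: Tuple[int, ...], mm_deltas: Tuple[int, ...]) -> Tuple[Tuple[int, Tuple[int, ...]], ...]:
--     # Phase 1: one pass over sequence keeping a running prefix sum and a
--     # cumulative target; record (boundary index, matched delta) pairs.
--     if not mm_deltas:
--         return ()
--     boundaries = []
--     prefix = 0
--     mm_index = 0
--     target = mm_deltas[0]
--     i = 0
--     for value in sequence:
--         i += 1
--         prefix += value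
--         if prefix == target:
--             boundaries.append((i, mm_deltas[mm_index]))
--             mm_index = (mm_index + 1) % len(mm_deltas)
--             target += mm_deltas[mm_index]
--     # Phase 2: slice sequence between consecutive boundaries.
--     result = []
--     start = 0
--     for end, delta in boundaries:
--         result.append((delta, tuple(sequence[start:end])))
--         start = end
--     return tuple(result)
-- ===== Notes on version B (the rewrite author's own statement) =====
-- stated objective: alternative
-- what changed: B splits the work into two phases: a boundary-finding pass that tracks a cumulative prefix sum against a cumulative target (instead of resetting a per-partition sum) and records only (index, delta) boundary pairs, then a slicing pass that cuts sequence between consecutive boundaries; A builds each partition element-by-element inside one loop.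
-- outside the precondition, e.g. on _calculate_measures((1, 2), ()): A raises IndexError, B returns ()
-- crash fix: When mm_deltas is empty and sequence is non-empty, A raises IndexError on mm_deltas[0]; B returns the empty tuple. — e.g. on _calculate_measures([1], []): A raises IndexError, B returns []
import Mathlib
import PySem

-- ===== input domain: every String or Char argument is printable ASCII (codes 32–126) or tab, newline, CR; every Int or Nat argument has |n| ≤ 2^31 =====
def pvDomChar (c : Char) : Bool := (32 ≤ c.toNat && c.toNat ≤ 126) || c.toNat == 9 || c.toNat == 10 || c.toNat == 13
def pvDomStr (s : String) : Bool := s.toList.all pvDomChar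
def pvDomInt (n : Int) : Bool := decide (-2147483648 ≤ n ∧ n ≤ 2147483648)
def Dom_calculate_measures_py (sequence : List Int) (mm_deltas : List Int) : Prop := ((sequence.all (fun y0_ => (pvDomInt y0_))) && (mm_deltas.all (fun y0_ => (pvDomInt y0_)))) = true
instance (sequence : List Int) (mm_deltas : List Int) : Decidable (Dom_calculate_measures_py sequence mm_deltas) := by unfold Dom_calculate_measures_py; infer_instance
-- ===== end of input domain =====

-- B replaces A's single element-accumulating loop by a boundary-finding pass (cumulative
-- prefix sum vs cumulative target) followed by a slicing pass; same cost, different decomposition.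

-- ===== PORT A =====
-- loop body of A: state = (partitions, current_partition, mm_index, current_sum)
def pvStepA (mm_deltas : List Int)
    (st : List (Int × List Int) × List Int × Int × Int) (value : Int) :
    List (Int × List Int) × List Int × Int × Int :=
  let parts := st.1
  let cur := st.2.1 ++ [value]
  let csum := st.2.2.2 + value
  if csum = PySem.List.pyGetD mm_deltas st.2.2.1 0 then
    (parts ++ [(PySem.List.pyGetD mm_deltas st.2.2.1 0, cur)], [],
     PySem.Int.mod (st.2.2.1 + 1) (PySem.List.len mm_deltas), 0)
  else (parts, cur, st.2.2.1, csum)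

def calculate_measures_py (sequence : List Int) (mm_deltas : List Int) : List (Int × List Int) :=
  (sequence.foldl (pvStepA mm_deltas) ([], [], 0, 0)).1

-- ===== PORT B =====
-- phase-1 loop body of B: state = (boundaries, prefix, mm_index, target, i)
def pvStepB (mm_deltas : List Int)
    (st : List (Int × Int) × Int × Int × Int × Int) (value : Int) :
    List (Int × Int) × Int × Int × Int × Int :=
  let i := st.2.2.2.2 + 1
  let pre := st.2.1 + value
  if pre = st.2.2.2.1 then
    let bounds := st.1 ++ [(i, PySem.List.pyGetD mm_deltas st.2.2.1 0)]
    let mmi := PySem.Int.mod (st.2.2.1 + 1) (PySem.List.len mm_deltas)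
    (bounds, pre, mmi, st.2.2.2.1 + PySem.List.pyGetD mm_deltas mmi 0, i)
  else (st.1, pre, st.2.2.1, st.2.2.2.1, i)

-- phase-2 loop body of B: state = (result, start)
def pvStep2 (sequence : List Int)
    (acc : List (Int × List Int) × Int) (b : Int × Int) :
    List (Int × List Int) × Int :=
  (acc.1 ++ [(b.2, PySem.List.slice sequence (some acc.2) (some b.1))], b.1)

def calculate_measures_py_alt (sequence : List Int) (mm_deltas : List Int) : List (Int × List Int) :=
  if mm_deltas = [] then []
  else
    let ph1 := sequence.foldl (pvStepB mm_deltas)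
      ([], 0, 0, PySem.List.pyGetD mm_deltas 0 0, 0)
    (ph1.1.foldl (pvStep2 sequence) ([], 0)).1

-- ===== PRECONDITION & SPEC =====
-- Pre_ excludes exactly the inputs where A raises IndexError: empty mm_deltas with a non-empty sequence.
def Pre_calculate_measures_py (sequence : List Int) (mm_deltas : List Int) : Prop :=
  mm_deltas ≠ [] ∨ sequence = []
instance (sequence : List Int) (mm_deltas : List Int) : Decidable (Pre_calculate_measures_py sequence mm_deltas) := by unfold Pre_calculate_measures_py; infer_instance

def pvWitness_calculate_measures_py : List Int × List Int := ([1, 2, 3], [3, 3])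

-- When mm_deltas is empty and sequence is non-empty, A raises IndexError on mm_deltas[0]; B returns the empty tuple.
def Raises_calculate_measures_py (sequence : List Int) (mm_deltas : List Int) : Prop :=
  mm_deltas = [] ∧ sequence ≠ []
instance (sequence : List Int) (mm_deltas : List Int) : Decidable (Raises_calculate_measures_py sequence mm_deltas) := by unfold Raises_calculate_measures_py; infer_instance
def pvRaiseWitness_calculate_measures_py : List Int × List Int := ([1], [])
def pvRaiseWitnessOut_calculate_measures_py : List (Int × List Int) := []

def Spec_calculate_measures_py (sequence : List Int) (mm_deltas : List Int) (out : List (Int × List Int)) : Prop := out = calculate_measures_py_alt sequence mm_deltas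
instance (sequence : List Int) (mm_deltas : List Int) (out : List (Int × List Int)) : Decidable (Spec_calculate_measures_py sequence mm_deltas out) := by unfold Spec_calculate_measures_py; infer_instance

-- ===== CLAIM (what is proved, stated in full; the proofs are below) =====
def Claim_equal_calculate_measures_py : Prop := ∀ (sequence : List Int) (mm_deltas : List Int), Dom_calculate_measures_py sequence mm_deltas → Pre_calculate_measures_py sequence mm_deltas → Spec_calculate_measures_py sequence mm_deltas (calculate_measures_py sequence mm_deltas)

def Claim_raises_calculate_measures_py : Prop := (∀ (sequence : List Int) (mm_deltas : List Int), Dom_calculate_measures_py sequence mm_deltas → Raises_calculate_measures_py sequence mm_deltas → ¬ Pre_calculate_measures_py sequence mm_deltas) ∧ (Dom_calculate_measures_py (pvRaiseWitness_calculate_measures_py.1) (pvRaiseWitness_calculate_measures_py.2) ∧ Raises_calculate_measures_py (pvRaiseWitness_calculate_measures_py.1) (pvRaiseWitness_calculate_measures_py.2) ∧ calculate_measures_py_alt (pvRaiseWitness_calculate_measures_py.1) (pvRaiseWitness_calculate_measures_py.2) = pvRaiseWitnessOut_calculate_measures_py)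

-- ===== LEMMAS AND PROOFS =====

-- Loop invariant linking A's single pass to B's two passes.  Processed part of the
-- sequence is q0 ++ cur (q0 = completed partitions, cur = current partition); r remains.
lemma pv_inv (md seq : List Int) (hne : md ≠ []) :
    ∀ (r q0 cur : List Int) (parts : List (Int × List Int)) (bounds : List (Int × Int)) (mmi : Int),
    0 ≤ mmi → mmi < (md.length : Int) →
    seq = q0 ++ cur ++ r →
    List.foldl (pvStep2 seq) ([], 0) bounds = (parts, (q0.length : Int)) →
    (List.foldl (pvStepA md) (parts, cur, mmi, cur.sum) r).1
      = ((List.foldl (pvStepB md)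
          (bounds, q0.sum + cur.sum, mmi, q0.sum + PySem.List.pyGetD md mmi 0,
           (q0.length : Int) + (cur.length : Int)) r).1.foldl (pvStep2 seq) ([], 0)).1 := by
  intro r
  induction r with
  | nil =>
      intro q0 cur parts bounds mmi _ _ _ h2
      simp [h2]
  | cons v rest ih =>
      intro q0 cur parts bounds mmi h0 h1 hseq h2
      by_cases h : cur.sum + v = PySem.List.pyGetD md mmi 0
      · -- boundary hit: both loops record, A starts a fresh partition
        have hmdpos : (0 : Int) < (md.length : Int) := by
          have : md.length ≠ 0 := by simpa using hne
          omega
        have hA : pvStepA md (parts, cur, mmi, cur.sum) v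
            = (parts ++ [(PySem.List.pyGetD md mmi 0, cur ++ [v])], [],
               PySem.Int.mod (mmi + 1) (PySem.List.len md), 0) := by
          simp [pvStepA, h]
        have hB : pvStepB md (bounds, q0.sum + cur.sum, mmi, q0.sum + PySem.List.pyGetD md mmi 0,
              (q0.length : Int) + (cur.length : Int)) v
            = (bounds ++ [((q0.length : Int) + (cur.length : Int) + 1, PySem.List.pyGetD md mmi 0)],
               q0.sum + cur.sum + v,
               PySem.Int.mod (mmi + 1) (PySem.List.len md),
               (q0.sum + PySem.List.pyGetD md mmi 0)
                 + PySem.List.pyGetD md (PySem.Int.mod (mmi + 1) (PySem.List.len md)) 0,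
               (q0.length : Int) + (cur.length : Int) + 1) := by
          simp [pvStepB]
          omega
        rw [List.foldl_cons, List.foldl_cons, hA, hB]
        have hmod0 : 0 ≤ PySem.Int.mod (mmi + 1) (PySem.List.len md) := by
          simpa [PySem.List.len_eq] using PySem.Int.mod_nonneg (mmi + 1) hmdpos
        have hmod1 : PySem.Int.mod (mmi + 1) (PySem.List.len md) < (md.length : Int) := by
          simpa [PySem.List.len_eq] using PySem.Int.mod_lt (mmi + 1) hmdpos
        have hslice : PySem.List.slice seq (some (q0.length : Int))
            (some ((q0.length : Int) + (cur.length : Int) + 1)) = cur ++ [v] := by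
          have : ((q0.length : Int) + (cur.length : Int) + 1)
              = ((q0.length : Nat) : Int) + (((cur.length + 1 : Nat)) : Int) := by push_cast; ring
          rw [this, PySem.List.slice_natCast_add, hseq]
          rw [List.append_assoc] at *
          rw [List.drop_left]
          have hlen : (cur ++ [v]).length = cur.length + 1 := by simp
          rw [show cur ++ v :: rest = (cur ++ [v]) ++ rest by simp, ← hlen, List.take_left]
        have h2' : List.foldl (pvStep2 seq) ([], 0)
            (bounds ++ [((q0.length : Int) + (cur.length : Int) + 1, PySem.List.pyGetD md mmi 0)])
            = (parts ++ [(PySem.List.pyGetD md mmi 0, cur ++ [v])],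
               (((q0 ++ cur ++ [v]).length : Nat) : Int)) := by
          rw [List.foldl_append, h2]
          simp [pvStep2, hslice]
          ring
        have := ih (q0 ++ cur ++ [v]) [] (parts ++ [(PySem.List.pyGetD md mmi 0, cur ++ [v])])
          (bounds ++ [((q0.length : Int) + (cur.length : Int) + 1, PySem.List.pyGetD md mmi 0)])
          (PySem.Int.mod (mmi + 1) (PySem.List.len md)) hmod0 hmod1
          (by rw [hseq]; simp) h2'
        simp only [List.sum_append, List.sum_nil, List.sum_cons, List.length_append,
          List.length_nil, List.length_cons, add_zero] at this ⊢
        rw [this]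
        convert rfl using 9; omega
      · -- no boundary: both loops just advance
        have hA : pvStepA md (parts, cur, mmi, cur.sum) v = (parts, cur ++ [v], mmi, cur.sum + v) := by
          simp [pvStepA, h]
        have hB : pvStepB md (bounds, q0.sum + cur.sum, mmi, q0.sum + PySem.List.pyGetD md mmi 0,
              (q0.length : Int) + (cur.length : Int)) v
            = (bounds, q0.sum + cur.sum + v, mmi, q0.sum + PySem.List.pyGetD md mmi 0,
               (q0.length : Int) + (cur.length : Int) + 1) := by
          simp [pvStepB]
          omega
        rw [List.foldl_cons, List.foldl_cons, hA, hB]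
        have := ih q0 (cur ++ [v]) parts bounds mmi h0 h1 (by rw [hseq]; simp) h2
        simp only [List.sum_append, List.sum_cons, List.sum_nil, add_zero,
          List.length_append, List.length_cons, List.length_nil] at this ⊢
        rw [this]
        push_cast
        ring_nf

-- ===== VERDICT (by name: the statement is the Claim_ definition above) =====
theorem calculate_measures_py_spec : Claim_equal_calculate_measures_py := by
  intro seq md _ hpre
  unfold Spec_calculate_measures_py calculate_measures_py calculate_measures_py_alt
  by_cases hmd : md = []
  · rcases hpre with h | h
    · exact absurd hmd h
    · subst h; simp [hmd]
  · simp only [hmd, ite_false]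
    have hlen : (0 : Int) < (md.length : Int) := by
      have : md.length ≠ 0 := by simpa using hmd
      omega
    have := pv_inv md seq hmd seq [] [] [] [] 0 le_rfl hlen (by simp) (by simp)
    simpa using this

@[simp] theorem calculate_measures_py_raises : Claim_raises_calculate_measures_py := by
  unfold Claim_raises_calculate_measures_py
  constructor
  · intro seq md _ hr hp
    rcases hp with h | h
    · exact h hr.1
    · exact hr.2 h
  · decide
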